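-- pv_equiv track=rewrite | github.com/josephmienko/ha-federated-access | scripts/users-cli.py | _is_likely_same_user
-- ===== SOURCE A (Python) =====
-- def _is_likely_same_user(email: str, ha_name: str) -> bool:
--     """Check if an email likely matches a HA user name."""
--     # Extract parts from email
--     email_local = email.split('@')[0].lower()
--     email_parts = email_local.replace('.', '_').split('_')
--
--     # Get first and last name from HA name
--     ha_parts = ha_name.split('_')
--
--     # Check for matches
--     if len(email_parts) > 0 and len(ha_parts) > 0:
--         # Match first letter or first name
--         if email_parts[0][0] == ha_parts[0][0] and len(ha_parts) > 1:
--             return True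
--         # Check if any name part matches
--         for ep in email_parts:
--             for hp in ha_parts:
--                 if ep and hp and len(ep) > 2 and len(hp) > 2:
--                     if ep.startswith(hp[:3]) or hp.startswith(ep[:3]):
--                         return True
--
--     return False
-- ===== SOURCE B (Python) =====
-- def _is_likely_same_user(email: str, ha_name: str) -> bool:
--     """Check if an email likely matches a HA user name."""
--     ha_parts = ha_name.split('_')
--     first, *rest = ha_parts
--     email_parts = _email_parts(email)
--     if email_parts[0][0] == first[0] and rest:
--         return True
--     return not _prefixes(email_parts).isdisjoint(_prefixes(ha_parts))
--
--
-- def _email_parts(email):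
--     local = email.split('@')[0].lower()
--     return local.replace('.', '_').split('_')
--
--
-- def _prefixes(parts):
--     return {p[:3] for p in parts if len(p) > 2}
-- ===== Notes on version B (the rewrite author's own statement) =====
-- stated objective: simpler
-- what changed: A's nested double loop with two startswith tests per part pair is replaced by building the set of 3-char prefixes of the long parts on each side once and testing the two sets for non-disjointness; the HA name is destructured into first/rest instead of the always-true len>0 guard.
import Mathlib
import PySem

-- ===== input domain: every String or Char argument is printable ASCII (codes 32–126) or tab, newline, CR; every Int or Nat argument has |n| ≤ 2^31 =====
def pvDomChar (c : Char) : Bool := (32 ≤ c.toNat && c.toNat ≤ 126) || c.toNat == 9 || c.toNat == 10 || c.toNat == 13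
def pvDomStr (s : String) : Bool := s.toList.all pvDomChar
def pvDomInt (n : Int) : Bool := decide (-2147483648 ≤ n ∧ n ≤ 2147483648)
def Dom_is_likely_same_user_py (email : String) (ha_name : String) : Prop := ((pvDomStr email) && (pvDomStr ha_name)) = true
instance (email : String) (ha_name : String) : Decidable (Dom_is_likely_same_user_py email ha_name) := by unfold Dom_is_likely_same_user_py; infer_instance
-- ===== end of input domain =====

-- B replaces A's nested double loop over the name parts by two sets of 3-char prefixes built
-- once per side and a disjointness test, destructuring the HA name instead of A's len>0 guard
-- (simpler; return value only).

-- ===== PORT A =====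
-- the 'email_parts[0][0] == ha_parts[0][0] and len(ha_parts) > 1' test; none = IndexError
def pvFirstLetterA? (eps hps : List (List Char)) : Option Bool := do
  let ep0 ← PySem.List.pyGet? eps 0
  let c1 ← PySem.List.pyGet? ep0 0
  let hp0 ← PySem.List.pyGet? hps 0
  let c2 ← PySem.List.pyGet? hp0 0
  return (c1 == c2 && decide (hps.length > 1))

-- the nested 'for ep in email_parts: for hp in ha_parts: …' with early return True
def pvLoopA (eps hps : List (List Char)) : Bool :=
  eps.any (fun ep => hps.any (fun hp =>
    !ep.isEmpty && !hp.isEmpty && decide (ep.length > 2) && decide (hp.length > 2) &&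
      (PySem.Chars.startswith ep (PySem.Chars.slice hp none (some 3)) ||
       PySem.Chars.startswith hp (PySem.Chars.slice ep none (some 3)))))

def is_likely_same_user_py (email : String) (ha_name : String) : Bool :=
  -- email.split('@')[0] can never fail: split returns at least one piece, so [0] is headD
  let email_local := PySem.Chars.lower ((PySem.Chars.splitOn email.toList ['@']).headD [])
  let email_parts := PySem.Chars.splitOn (PySem.Chars.replace email_local ['.'] ['_']) ['_']
  let ha_parts := PySem.Chars.splitOn ha_name.toList ['_']
  if email_parts.length > 0 && ha_parts.length > 0 then
    match pvFirstLetterA? email_parts ha_parts with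
    | none => false   -- Python raises IndexError here; excluded by Pre_
    | some b => if b then true else pvLoopA email_parts ha_parts
  else false

-- ===== PORT B =====
-- helper _email_parts of Source B
def pvEmailPartsB (email : String) : List (List Char) :=
  let loc := PySem.Chars.lower ((PySem.Chars.splitOn email.toList ['@']).headD [])
  PySem.Chars.splitOn (PySem.Chars.replace loc ['.'] ['_']) ['_']

-- helper _prefixes of Source B: {p[:3] for p in parts if len(p) > 2}
def pvPrefixesB (parts : List (List Char)) : PySem.Set (List Char) :=
  PySem.Set.ofList ((parts.filter (fun p => decide (p.length > 2))).map
    (fun p => PySem.Chars.slice p none (some 3)))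

def is_likely_same_user_py_alt (email : String) (ha_name : String) : Bool :=
  match PySem.Chars.splitOn ha_name.toList ['_'] with
  | [] => false          -- unreachable: str.split never yields an empty list
  | first :: rest =>     -- 'first, *rest = ha_parts'
    let email_parts := pvEmailPartsB email
    match email_parts.head?.bind List.head?, first.head? with
    | some c, some d =>  -- 'email_parts[0][0] == first[0] and rest'
      if c == d && !rest.isEmpty then true
      else !PySem.Set.isdisjoint (pvPrefixesB email_parts) (pvPrefixesB (first :: rest))
    | _, _ => false      -- Python raises IndexError here; excluded by Pre_

-- ===== PRECONDITION & SPEC =====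
-- Pre_ excludes exactly the inputs on which A raises IndexError (both programs raise there):
-- email empty or starting with '@', '.' or '_' (empty first email part), or ha_name empty or
-- starting with '_' (empty first HA part).
def Pre_is_likely_same_user_py (email : String) (ha_name : String) : Prop :=
  (email.toList.head?.any (fun c => !(c == '@' || c == '.' || c == '_')) = true) ∧
  (ha_name.toList.head?.any (fun c => !(c == '_')) = true)

instance (email : String) (ha_name : String) : Decidable (Pre_is_likely_same_user_py email ha_name) := by
  unfold Pre_is_likely_same_user_py; infer_instance

def pvWitness_is_likely_same_user_py : String × String := ("john.smith@example.com", "john_smith")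

def Spec_is_likely_same_user_py (email : String) (ha_name : String) (out : Bool) : Prop :=
  out = is_likely_same_user_py_alt email ha_name
instance (email : String) (ha_name : String) (out : Bool) : Decidable (Spec_is_likely_same_user_py email ha_name out) := by
  unfold Spec_is_likely_same_user_py; infer_instance

-- ===== CLAIM (what is proved, stated in full; the proofs are below) =====
def Claim_equal_is_likely_same_user_py : Prop := ∀ (email : String) (ha_name : String), Dom_is_likely_same_user_py email ha_name → Pre_is_likely_same_user_py email ha_name → Spec_is_likely_same_user_py email ha_name (is_likely_same_user_py email ha_name)

-- ===== LEMMAS AND PROOFS =====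

-- a prefix of length 3 of a list of length ≥ 3 is exactly its first three characters
theorem pv_prefix_take3 {p s : List Char} (hp : p.length = 3) :
    p <+: s ↔ p = s.take 3 := by
  rw [List.prefix_iff_eq_take, hp]

-- the two startswith tests of A collapse to equality of the 3-char prefixes
theorem pv_pair_iff (ep hp : List Char) (he : 2 < ep.length) (hh : 2 < hp.length) :
    (PySem.Chars.startswith ep (PySem.Chars.slice hp none (some 3)) ||
     PySem.Chars.startswith hp (PySem.Chars.slice ep none (some 3))) = true ↔
    ep.take 3 = hp.take 3 := by
  have h3 : PySem.Chars.slice hp none (some 3) = hp.take 3 := by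
    simp [PySem.Chars.slice_eq_listSlice, PySem.List.slice_to]
  have e3 : PySem.Chars.slice ep none (some 3) = ep.take 3 := by
    simp [PySem.Chars.slice_eq_listSlice, PySem.List.slice_to]
  rw [h3, e3, Bool.or_eq_true, PySem.Chars.startswith_iff, PySem.Chars.startswith_iff,
    pv_prefix_take3 (by simp; omega), pv_prefix_take3 (by simp; omega)]
  constructor
  · rintro (h | h) <;> simp_all
  · intro h; left; exact h.symm

-- membership in Source B's prefix set
theorem pv_mem_prefixes (parts : List (List Char)) (x : List Char) :
    x ∈ (pvPrefixesB parts : List (List Char)) ↔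
      ∃ p ∈ parts, 2 < p.length ∧ x = p.take 3 := by
  simp only [pvPrefixesB, PySem.Set.mem_ofList, List.mem_map, List.mem_filter,
    decide_eq_true_eq]
  constructor
  · rintro ⟨p, ⟨hp, hl⟩, rfl⟩
    exact ⟨p, hp, hl, by simp [PySem.Chars.slice_eq_listSlice, PySem.List.slice_to]⟩
  · rintro ⟨p, hp, hl, rfl⟩
    exact ⟨p, ⟨hp, hl⟩, by simp [PySem.Chars.slice_eq_listSlice, PySem.List.slice_to]⟩

-- A's nested loop IS B's disjointness test of the two prefix sets
theorem pv_loop_eq_disjoint (eps hps : List (List Char)) :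
    pvLoopA eps hps = !PySem.Set.isdisjoint (pvPrefixesB eps) (pvPrefixesB hps) := by
  rw [Bool.eq_iff_iff]
  simp only [Bool.not_eq_true', pvLoopA, List.any_eq_true, Bool.and_eq_true, decide_eq_true_eq]
  constructor
  · rintro ⟨ep, hep, hp, hhp, ⟨⟨⟨_, _⟩, helen⟩, hlen⟩, hmatch⟩
    rw [pv_pair_iff ep hp helen hlen] at hmatch
    apply Bool.eq_false_iff.mpr
    intro hdis
    exact (PySem.Set.isdisjoint_iff _ _).mp hdis (ep.take 3)
      ((pv_mem_prefixes eps _).mpr ⟨ep, hep, helen, rfl⟩)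
      ((pv_mem_prefixes hps _).mpr ⟨hp, hhp, hlen, hmatch⟩)
  · intro hdis
    have hne : ¬ ∀ x ∈ (pvPrefixesB eps : List (List Char)), x ∉ (pvPrefixesB hps : List (List Char)) := by
      intro hall
      rw [← PySem.Set.isdisjoint_iff] at hall
      simp [hdis] at hall
    push Not at hne
    obtain ⟨x, hxe, hxh⟩ := hne
    obtain ⟨ep, hep, helen, rfl⟩ := (pv_mem_prefixes eps _).mp hxe
    obtain ⟨hp, hhp, hlen, hmatch⟩ := (pv_mem_prefixes hps _).mp hxh
    refine ⟨ep, hep, hp, hhp, ⟨⟨⟨?_, ?_⟩, helen⟩, hlen⟩, ?_⟩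
    · simp; exact List.ne_nil_of_length_pos (by omega)
    · simp; exact List.ne_nil_of_length_pos (by omega)
    · rw [pv_pair_iff ep hp helen hlen]; exact hmatch

-- the whole post-preprocessing computation of A equals that of B, for ANY part lists
theorem pv_core (eps hps : List (List Char)) :
    (if (decide (eps.length > 0) && decide (hps.length > 0)) = true then
        match pvFirstLetterA? eps hps with
        | none => false
        | some b => if b then true else pvLoopA eps hps
      else false)
    = match hps with
      | [] => false
      | first :: rest =>
        match eps.head?.bind List.head?, first.head? with
        | some c, some d =>
          if c == d && !rest.isEmpty then true
          else !PySem.Set.isdisjoint (pvPrefixesB eps) (pvPrefixesB (first :: rest))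
        | _, _ => false := by
  rcases hps with _ | ⟨first, rest⟩
  · simp
  rcases eps with _ | ⟨e0, es⟩
  · simp
  rcases e0 with _ | ⟨c, e0t⟩
  · simp [pvFirstLetterA?, PySem.List.pyGet?, PySem.List.pyIdx?]
  rcases first with _ | ⟨d, ft⟩
  · simp [pvFirstLetterA?, PySem.List.pyGet?, PySem.List.pyIdx?]
  · have hfl : pvFirstLetterA? ((c :: e0t) :: es) ((d :: ft) :: rest)
        = some (c == d && decide (rest.length + 1 > 1)) := by
      simp [pvFirstLetterA?, PySem.List.pyGet?, PySem.List.pyIdx?]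
    have hrest : decide (rest.length + 1 > 1) = !rest.isEmpty := by
      cases rest <;> simp
    simp only [hfl, hrest]
    simp [pv_loop_eq_disjoint]

-- ===== VERDICT (by name: the statement is the Claim_ definition above) =====
theorem is_likely_same_user_py_spec : Claim_equal_is_likely_same_user_py := by
  intro email ha_name _ _
  show is_likely_same_user_py email ha_name = is_likely_same_user_py_alt email ha_name
  unfold is_likely_same_user_py is_likely_same_user_py_alt pvEmailPartsB
  exact pv_core
    (PySem.Chars.splitOn
      (PySem.Chars.replace (PySem.Chars.lower ((PySem.Chars.splitOn email.toList ['@']).headD []))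
        ['.'] ['_']) ['_'])
    (PySem.Chars.splitOn ha_name.toList ['_'])
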